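-- pv_equiv track=rewrite | github.com/raigu/puzzles | day11/main.py | check_rule1
-- ===== SOURCE A (Python) =====
-- def check_rule1(sequence) -> bool:
--     """
--     >>> check_rule1('hijklmmn')
--     True
--     """
--     k = 0
--     while k < len(sequence) - 2:
--         if ord(sequence[k]) + 1 == ord(sequence[k + 1]) == ord(sequence[k + 2]) - 1:
--             return True
--         else:
--             k += 1
--     return False
-- ===== SOURCE B (Python) =====
-- def check_rule1(sequence) -> bool:
--     run = 0
--     for i in range(len(sequence) - 1):
--         if ord(sequence[i + 1]) == ord(sequence[i]) + 1:
--             run += 1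
--             if run >= 2:
--                 return True
--         else:
--             run = 0
--     return False
-- ===== Notes on version B (the rewrite author's own statement) =====
-- stated objective: alternative
-- what changed: B scans adjacent pairs once maintaining a run-length counter of consecutive +1 steps (returning once the run reaches 2) instead of testing each overlapping window of three characters independently.
import Mathlib
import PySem

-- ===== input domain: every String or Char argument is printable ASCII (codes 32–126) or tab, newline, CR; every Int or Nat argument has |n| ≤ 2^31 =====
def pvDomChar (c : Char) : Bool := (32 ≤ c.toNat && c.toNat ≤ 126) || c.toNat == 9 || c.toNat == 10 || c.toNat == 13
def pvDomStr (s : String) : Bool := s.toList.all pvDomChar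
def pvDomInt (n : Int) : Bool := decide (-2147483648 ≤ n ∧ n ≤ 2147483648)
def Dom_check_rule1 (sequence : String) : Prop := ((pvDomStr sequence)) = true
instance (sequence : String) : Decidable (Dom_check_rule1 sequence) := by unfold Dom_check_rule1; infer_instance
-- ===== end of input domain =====

-- B replaces A's independent tests of each 3-character window by a single pass over
-- adjacent pairs maintaining a run counter of consecutive +1 steps (objective: alternative).

-- ===== PORT A =====
-- A's while-loop over index k, testing the window sequence[k..k+2].
def pvLoopA (cs : List Char) (k : Nat) : Bool :=
  if k < cs.length - 2 then
    if ((cs.getD k default).toNat : Int) + 1 = ((cs.getD (k + 1) default).toNat : Int) ∧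
       ((cs.getD (k + 1) default).toNat : Int) = ((cs.getD (k + 2) default).toNat : Int) - 1 then
      true
    else
      pvLoopA cs (k + 1)
  else
    false
termination_by cs.length - 2 - k
decreasing_by omega

def check_rule1 (sequence : String) : Bool := pvLoopA sequence.toList 0

-- ===== PORT B =====
-- B's for-loop over adjacent pairs with the run counter.
def pvLoopB : List Char → Nat → Bool
  | c1 :: c2 :: rest, run =>
    if (c2.toNat : Int) = (c1.toNat : Int) + 1 then
      if run + 1 ≥ 2 then true else pvLoopB (c2 :: rest) (run + 1)
    else
      pvLoopB (c2 :: rest) 0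
  | _, _ => false

def check_rule1_alt (sequence : String) : Bool := pvLoopB sequence.toList 0

-- ===== PRECONDITION & SPEC =====
def Spec_check_rule1 (sequence : String) (out : Bool) : Prop := out = check_rule1_alt sequence
instance (sequence : String) (out : Bool) : Decidable (Spec_check_rule1 sequence out) := by unfold Spec_check_rule1; infer_instance

-- ===== CLAIM (what is proved, stated in full; the proofs are below) =====
def Claim_equal_check_rule1 : Prop := ∀ (sequence : String), Dom_check_rule1 sequence → Spec_check_rule1 sequence (check_rule1 sequence)

-- ===== LEMMAS AND PROOFS =====

-- "has a straight of three" predicate, the common characterisation of both loops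
def pvT : List Char → Bool
  | c1 :: c2 :: c3 :: rest =>
    (((c2.toNat : Int) = (c1.toNat : Int) + 1 ∧ (c3.toNat : Int) = (c2.toNat : Int) + 1 : Prop) : Bool)
      || pvT (c2 :: c3 :: rest)
  | _ => false

-- head pair is a +1 step
def pvP : List Char → Bool
  | c1 :: c2 :: _ => ((c2.toNat : Int) = (c1.toNat : Int) + 1 : Bool)
  | _ => false

theorem pvLoopA_eq_T (cs : List Char) (k : Nat) : pvLoopA cs k = pvT (cs.drop k) := by
  fun_induction pvLoopA cs k with
  | case1 k h hc =>
    have h0 : k < cs.length := by omega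
    have h1 : k + 1 < cs.length := by omega
    have h2 : k + 2 < cs.length := by omega
    rw [List.drop_eq_getElem_cons h0, List.drop_eq_getElem_cons h1, List.drop_eq_getElem_cons h2]
    simp only [pvT, List.getD_eq_getElem cs default h0, List.getD_eq_getElem cs default h1,
      List.getD_eq_getElem cs default h2] at hc ⊢
    have : ((cs[k].toNat : Int) + 1 = (cs[k+1].toNat : Int) ∧
        (cs[k+1].toNat : Int) = (cs[k+2].toNat : Int) - 1) ↔
        ((cs[k+1].toNat : Int) = (cs[k].toNat : Int) + 1 ∧
        (cs[k+2].toNat : Int) = (cs[k+1].toNat : Int) + 1) := by constructor <;> (intro ⟨a, b⟩; omega)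
    rw [decide_eq_true (this.mp hc)]
    simp
  | case2 k h hc ih =>
    have h0 : k < cs.length := by omega
    have h1 : k + 1 < cs.length := by omega
    have h2 : k + 2 < cs.length := by omega
    rw [List.drop_eq_getElem_cons h0]
    rw [ih]
    rw [List.drop_eq_getElem_cons h1, List.drop_eq_getElem_cons h2]
    simp only [pvT, List.getD_eq_getElem cs default h0, List.getD_eq_getElem cs default h1,
      List.getD_eq_getElem cs default h2] at hc ⊢
    have : ¬ ((cs[k+1].toNat : Int) = (cs[k].toNat : Int) + 1 ∧
        (cs[k+2].toNat : Int) = (cs[k+1].toNat : Int) + 1) := by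
      intro ⟨a, b⟩; exact hc ⟨by omega, by omega⟩
    rw [decide_eq_false this]
    simp
  | case3 k h =>
    match hd : cs.drop k with
    | [] => simp [pvT]
    | [c] => simp [pvT]
    | [c, d] => simp [pvT]
    | c :: d :: e :: t =>
      exfalso
      have := List.length_drop (l := cs) (i := k)
      rw [hd] at this
      simp at this
      omega

theorem pvLoopB_eq (cs : List Char) (run : Nat) :
    pvLoopB cs run = ((decide (1 ≤ run) && pvP cs) || pvT cs) := by
  induction cs generalizing run with
  | nil => simp [pvLoopB, pvP, pvT]
  | cons c1 t ih =>
    match t with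
    | [] => simp [pvLoopB, pvP, pvT]
    | c2 :: rest =>
      rw [pvLoopB]
      by_cases hs : (c2.toNat : Int) = (c1.toNat : Int) + 1
      · rw [if_pos hs]
        by_cases hr : run + 1 ≥ 2
        · rw [if_pos hr]
          have h1 : (1 : Nat) ≤ run := by omega
          match rest with
          | [] =>
            simp [pvP, pvT, hs, h1]
          | c3 :: rest' =>
            simp [pvP, hs, h1]
        · rw [if_neg hr]
          rw [ih]
          have hr0 : run = 0 := by omega
          subst hr0
          match rest with
          | [] => simp [pvP, pvT]
          | c3 :: rest' =>
            simp only [pvP, pvT]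
            by_cases h3 : (c3.toNat : Int) = (c2.toNat : Int) + 1
            · simp [hs]
            · simp [hs]
      · rw [if_neg hs]
        rw [ih]
        match rest with
        | [] => simp [pvP, pvT, hs]
        | c3 :: rest' =>
          simp only [pvP, pvT]
          simp [hs]

-- ===== VERDICT (by name: the statement is the Claim_ definition above) =====
theorem check_rule1_spec : Claim_equal_check_rule1 := by
  intro s _
  unfold Spec_check_rule1 check_rule1 check_rule1_alt
  rw [pvLoopA_eq_T, pvLoopB_eq]
  simp
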